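-- pv_equiv track=rewrite | github.com/1193639809ZD/PythonStudy | 笔试/水滴/1.py | max_multiplications
-- ===== SOURCE A (Python) =====
-- def max_multiplications(a, b):
--     # 如果 b 小于 a 或 b % a != 0，则无法通过乘法达到 b
--     if b < a:
--         return -1
--     count = 0
--
--     # 当 b > a 时，我们每次尝试将 b 除以一个可以整除的数
--     while b > a:
--         # 找到 b 中的最小因子（大于1的数）
--         found = False
--         for i in range(2, b):
--             if b % (a * i) == 0:
--                 a *= i
--                 count += 1
--                 found = True
--                 break
--         if not found:
--             return -1
--
--     # 如果最终 b == a，则说明成功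
--     return count if b == a else -1
-- ===== SOURCE B (Python) =====
-- def max_multiplications(a, b):
--     # Count multiplications as the number of prime factors (with multiplicity)
--     # of b // a, found by trial division up to sqrt of the remaining cofactor.
--     if b < a:
--         return -1
--     if b == a:
--         return 0
--     if a <= 0 or b % a != 0:
--         return -1
--     m = b // a
--     count = 0
--     d = 2
--     while d * d <= m:
--         if m % d == 0:
--             m //= d
--             count += 1
--         else:
--             d += 1
--     if m > 1:
--         count += 1
--     return count
-- ===== Notes on version B (the rewrite author's own statement) =====
-- stated objective: alternative
-- what changed: Replaced the greedy a*=i search that rescans range(2,b) once per multiplication with a single trial-division factorization of b//a up to the square root of the remaining cofactor, after O(1) divisibility/sign checks.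
-- intended difference: For a == 1 and b prime, A returns -1 because its inner scan range(2, b) stops just before the needed multiplier i = b, while B returns 1 (one multiplication 1*b reaches b), which is the intended count. — e.g. on max_multiplications(1, 5): A returns -1, B returns 1
import Mathlib
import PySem

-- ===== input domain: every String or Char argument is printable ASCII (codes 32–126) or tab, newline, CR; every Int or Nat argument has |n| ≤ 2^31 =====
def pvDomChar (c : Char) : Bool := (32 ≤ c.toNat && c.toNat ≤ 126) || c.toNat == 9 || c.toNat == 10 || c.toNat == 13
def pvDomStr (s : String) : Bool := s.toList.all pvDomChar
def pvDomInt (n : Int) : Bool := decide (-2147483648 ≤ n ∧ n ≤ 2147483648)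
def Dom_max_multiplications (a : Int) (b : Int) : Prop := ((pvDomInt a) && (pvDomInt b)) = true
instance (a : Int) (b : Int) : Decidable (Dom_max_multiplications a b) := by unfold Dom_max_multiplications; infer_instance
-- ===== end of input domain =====

-- B replaces A's repeated linear scans for a next multiplier (one scan per multiplication)
-- by a single trial-division factorization of b // a.
-- A raises ZeroDivisionError for a = 0 < b (excluded by Pre_, where B returns -1);
-- for a = 1 and b prime A returns -1 where B returns the intended 1 (stated as D_).

-- ===== PORT A =====
-- 'for i in range(2, b): if b % (a * i) == 0: <hit i>' — the Nat argument is the number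
-- of loop iterations still to run, len(range(2, b)) = (b - 2).toNat at the start
def pvFindAGo (a : Int) (b : Int) (i : Int) : Nat → Option Int
  | 0 => none
  | Nat.succ n => if PySem.Int.mod b (a * i) = 0 then some i else pvFindAGo a b (i + 1) n

def pvFindA (a : Int) (b : Int) : Option Int := pvFindAGo a b 2 (b - 2).toNat

-- 'while b > a: …'; the fuel only makes the recursion total: 64 steps are proved
-- sufficient for every input admitted by Dom_ and Pre_ (lemmas below); the final
-- 'if b = a then count else -1' is A's 'return count if b == a else -1'
def pvLoopA (fuel : Nat) (a : Int) (b : Int) (count : Int) : Int :=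
  match fuel with
  | 0 => -1
  | Nat.succ fuel =>
    if b > a then
      match pvFindA a b with
      | some i => pvLoopA fuel (a * i) b (count + 1)
      | none => -1
    else if b = a then count else -1

def max_multiplications (a : Int) (b : Int) : Int :=
  if b < a then -1 else pvLoopA 64 a b 0

-- ===== PORT B =====
-- 'while d * d <= m: if m % d == 0: m //= d; count += 1 else: d += 1' followed by
-- 'count + 1 if m > 1 else count'; the fuel only makes the loop total (each iteration
-- strictly decreases 2*m - d, so 2*m fuel is proved sufficient), and on exhausted fuel
-- we perform the same loop-exit tail
def pvTrialB (fuel : Nat) (m : Int) (d : Int) (count : Int) : Int :=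
  match fuel with
  | 0 => if m > 1 then count + 1 else count
  | Nat.succ fuel =>
    if d * d ≤ m then
      if PySem.Int.mod m d = 0 then pvTrialB fuel (PySem.Int.floordiv m d) d (count + 1)
      else pvTrialB fuel m (d + 1) count
    else if m > 1 then count + 1 else count

def max_multiplications_alt (a : Int) (b : Int) : Int :=
  if b < a then -1
  else if b = a then 0
  else if a ≤ 0 ∨ ¬ PySem.Int.mod b a = 0 then -1
  else pvTrialB (2 * PySem.Int.floordiv b a).toNat (PySem.Int.floordiv b a) 2 0

-- ===== PRECONDITION & SPEC =====
-- Pre_ excludes exactly the inputs where A raises ZeroDivisionError: a = 0 with b > 0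
-- (the loop body then evaluates b % (a * i) with a * i = 0).
def Pre_max_multiplications (a : Int) (b : Int) : Prop := ¬ (a = 0 ∧ 0 < b)
instance (a : Int) (b : Int) : Decidable (Pre_max_multiplications a b) := by
  unfold Pre_max_multiplications; infer_instance

def pvWitness_max_multiplications : Int × Int := (3, 24)

-- For a = 1 and b prime, A returns -1 because its inner scan range(2, b) stops just before
-- the needed multiplier i = b, while B returns 1 (one multiplication 1*b = b), the intended count.
def D_max_multiplications (a : Int) (b : Int) : Prop := a = 1 ∧ 1 < b ∧ Nat.Prime b.toNat
instance (a : Int) (b : Int) : Decidable (D_max_multiplications a b) := by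
  unfold D_max_multiplications; infer_instance

def Spec_max_multiplications (a : Int) (b : Int) (out : Int) : Prop :=
  ¬ D_max_multiplications a b → out = max_multiplications_alt a b
instance (a : Int) (b : Int) (out : Int) : Decidable (Spec_max_multiplications a b out) := by
  unfold Spec_max_multiplications; infer_instance

def pvDiffWitness_max_multiplications : Int × Int := (1, 5)
def pvDiffWitnessOut_max_multiplications : Int × Int := (-1, 1)

-- ===== CLAIM (what is proved, stated in full; the proofs are below) =====
def Claim_unchanged_max_multiplications : Prop := ∀ (a : Int) (b : Int), Dom_max_multiplications a b → Pre_max_multiplications a b → Spec_max_multiplications a b (max_multiplications a b)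
def Claim_changed_max_multiplications : Prop := Dom_max_multiplications (pvDiffWitness_max_multiplications.1) (pvDiffWitness_max_multiplications.2) ∧ Pre_max_multiplications (pvDiffWitness_max_multiplications.1) (pvDiffWitness_max_multiplications.2) ∧ D_max_multiplications (pvDiffWitness_max_multiplications.1) (pvDiffWitness_max_multiplications.2) ∧ max_multiplications (pvDiffWitness_max_multiplications.1) (pvDiffWitness_max_multiplications.2) = pvDiffWitnessOut_max_multiplications.1 ∧ max_multiplications_alt (pvDiffWitness_max_multiplications.1) (pvDiffWitness_max_multiplications.2) = pvDiffWitnessOut_max_multiplications.2 ∧ pvDiffWitnessOut_max_multiplications.1 ≠ pvDiffWitnessOut_max_multiplications.2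
def Claim_exact_max_multiplications : Prop := ∀ (a : Int) (b : Int), Dom_max_multiplications a b → Pre_max_multiplications a b → D_max_multiplications a b → max_multiplications a b ≠ max_multiplications_alt a b

-- ===== LEMMAS AND PROOFS =====

-- number of prime factors with multiplicity: the common specification of both loops
def pvOmega (n : Nat) : Nat :=
  if h : 2 ≤ n then pvOmega (n / n.minFac) + 1 else 0
termination_by n
decreasing_by
  exact Nat.div_lt_self (by omega) (Nat.Prime.one_lt (Nat.minFac_prime (by omega)))

theorem pvOmega_two_le {n : Nat} (h : 2 ≤ n) :
    pvOmega n = pvOmega (n / n.minFac) + 1 := by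
  rw [pvOmega]; simp [h]

theorem pvOmega_one : pvOmega 1 = 0 := by rw [pvOmega]; simp

-- the scan: what a hit means
theorem pvFindAGo_some : ∀ (n : Nat) (a b i j : Int), pvFindAGo a b i n = some j →
    i ≤ j ∧ j < i + n ∧ (a * j) ∣ b := by
  intro n
  induction n with
  | zero => intro a b i j h; simp [pvFindAGo] at h
  | succ n ih =>
    intro a b i j h
    rw [pvFindAGo] at h
    split at h
    · rename_i hm
      injection h with h
      subst h
      exact ⟨le_rfl, by omega, (PySem.Int.mod_eq_zero_iff_dvd b (a * i)).mp hm⟩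
    · obtain ⟨h1, h2, h3⟩ := ih a b (i + 1) j h
      exact ⟨by omega, by omega, h3⟩

-- the scan: no hit when nothing in the window divides
theorem pvFindAGo_none : ∀ (n : Nat) (a b i : Int),
    (∀ j, i ≤ j → j < i + n → ¬ (a * j) ∣ b) → pvFindAGo a b i n = none := by
  intro n
  induction n with
  | zero => intro a b i _; rfl
  | succ n ih =>
    intro a b i h
    rw [pvFindAGo]
    rw [if_neg, ih a b (i + 1) (fun j h1 h2 => h j (by omega) (by omega))]
    rw [PySem.Int.mod_eq_zero_iff_dvd]
    exact h i le_rfl (by omega)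

-- the scan returns the least qualifying index
theorem pvFindAGo_min : ∀ (n : Nat) (a b i p : Int), i ≤ p → p < i + n → (a * p) ∣ b →
    (∀ j, i ≤ j → j < p → ¬ (a * j) ∣ b) → pvFindAGo a b i n = some p := by
  intro n
  induction n with
  | zero => intro a b i p h1 h2 _ _; omega
  | succ n ih =>
    intro a b i p h1 h2 hd hmin
    rw [pvFindAGo]
    by_cases hip : i = p
    · subst hip
      rw [if_pos (PySem.Int.mod_eq_zero_iff_dvd b (a * i) |>.mpr hd)]
    · rw [if_neg, ih a b (i + 1) p (by omega) (by omega) hd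
        (fun j hj1 hj2 => hmin j (by omega) hj2)]
      rw [PySem.Int.mod_eq_zero_iff_dvd]
      exact hmin i le_rfl (by omega)

theorem pvFindA_some {a b j : Int} (h : pvFindA a b = some j) :
    2 ≤ j ∧ j < b ∧ (a * j) ∣ b := by
  obtain ⟨h1, h2, h3⟩ := pvFindAGo_some (b - 2).toNat a b 2 j h
  exact ⟨h1, by omega, h3⟩

theorem pvFindA_none {a b : Int} (h : ∀ j, 2 ≤ j → j < b → ¬ (a * j) ∣ b) :
    pvFindA a b = none :=
  pvFindAGo_none _ a b 2 (fun j h1 h2 => h j h1 (by omega))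

theorem pvFindA_min {a b p : Int} (h2 : 2 ≤ p) (hb : p < b) (hd : (a * p) ∣ b)
    (hmin : ∀ j, 2 ≤ j → j < p → ¬ (a * j) ∣ b) : pvFindA a b = some p :=
  pvFindAGo_min _ a b 2 p h2 (by omega) hd hmin

-- A's loop returns -1 for negative a, positive b (|a| at least doubles at every hit)
theorem pvLoopA_neg : ∀ (fuel : Nat) (a b count : Int), a < 0 → 0 < b →
    b < (-a) * 2 ^ fuel → pvLoopA fuel a b count = -1 := by
  intro fuel
  induction fuel with
  | zero => intro a b count _ _ _; rfl
  | succ fuel ih =>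
    intro a b count ha hb hlt
    rw [pvLoopA, if_pos (by omega)]
    cases hf : pvFindA a b with
    | none => rfl
    | some i =>
      obtain ⟨hi2, _, hdvd⟩ := pvFindA_some hf
      apply ih _ _ _ (by nlinarith) hb
      have h2 : (0:Int) < 2 ^ fuel := by positivity
      have : (-a) * 2 ^ (fuel + 1) = (-(a * 2)) * 2 ^ fuel := by ring
      nlinarith

-- A's loop counts the prime factors of the cofactor m (with multiplicity) once a ≥ 2
theorem pvLoopA_pos : ∀ (fuel : Nat) (a m count : Int), 2 ≤ a → 1 ≤ m →
    m < 2 ^ fuel → pvLoopA fuel a (a * m) count = count + (pvOmega m.toNat : Int) := by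
  intro fuel
  induction fuel with
  | zero => intro a m count _ _ _; norm_num at *; omega
  | succ fuel ih =>
    intro a m count ha hm hlt
    by_cases hm1 : m = 1
    · subst hm1
      rw [pvLoopA, if_neg (by omega), if_pos (by ring)]
      simp [pvOmega_one]
    · have hm2 : 2 ≤ m := by omega
      set N := m.toNat with hN
      have hNm : (N : Int) = m := Int.toNat_of_nonneg (by omega)
      set p := N.minFac with hp
      have hpp : p.Prime := Nat.minFac_prime (by omega)
      have hp2 : 2 ≤ p := hpp.two_le
      have hpd : p ∣ N := Nat.minFac_dvd N
      have hpm : p ≤ N := Nat.le_of_dvd (by omega) hpd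
      have hpdZ : (p : Int) ∣ m := by rw [← hNm]; exact_mod_cast hpd
      obtain ⟨m', hmm'⟩ := hpdZ
      have hm'1 : 1 ≤ m' := by nlinarith
      have hfind : pvFindA a (a * m) = some (p : Int) := by
        refine pvFindA_min (by exact_mod_cast hp2) (by nlinarith)
          (mul_dvd_mul_left a (Dvd.intro m' hmm'.symm)) ?_
        intro j hj1 hj2 hjd
        have hjm : j ∣ m := (mul_dvd_mul_iff_left (by omega : a ≠ 0)).mp hjd
        have hjN : j.toNat ∣ N := by
          have : (j.toNat : Int) ∣ (N : Int) := by
            rwa [hNm, Int.toNat_of_nonneg (by omega : (0:Int) ≤ j)]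
          exact_mod_cast this
        have := Nat.minFac_le_of_dvd (by omega) hjN
        omega
      rw [pvLoopA, if_pos (by nlinarith), hfind]
      show pvLoopA fuel (a * (p : Int)) (a * m) (count + 1) = count + (pvOmega N : Int)
      have hrw : a * m = (a * (p : Int)) * m' := by rw [hmm']; ring
      rw [hrw, ih (a * (p : Int)) m' (count + 1) (by nlinarith) hm'1 (by
        have h2 : (2:Int) ^ (fuel + 1) = 2 * 2 ^ fuel := by ring
        nlinarith)]
      have hm'T : (m'.toNat : Int) = m' := Int.toNat_of_nonneg (by omega)
      have hNsplit : N = p * m'.toNat := by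
        have : (N : Int) = (p : Int) * (m'.toNat : Int) := by rw [hNm, hm'T]; exact hmm'
        exact_mod_cast this
      have hdivN : N / p = m'.toNat := by
        rw [hNsplit]; exact Nat.mul_div_cancel_left _ (by omega)
      rw [pvOmega_two_le (by omega : 2 ≤ N), ← hp, hdivN]
      push_cast
      ring

-- B's loop-exit tail: when no divisor < d remains and d*d > m, m is 1 or prime
theorem pvTrialB_exit {m d count : Int} (hd : 2 ≤ d) (hm : 1 ≤ m) (hlt : m < d * d)
    (hinv : ∀ k : Int, 2 ≤ k → k < d → ¬ k ∣ m) :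
    (if m > 1 then count + 1 else count) = count + (pvOmega m.toNat : Int) := by
  by_cases hm1 : m = 1
  · subst hm1; simp [pvOmega_one]
  · have hm2 : 2 ≤ m := by omega
    set N := m.toNat with hN
    have hNm : (N : Int) = m := Int.toNat_of_nonneg (by omega)
    set p := N.minFac with hp
    have hp2 : 2 ≤ p := (Nat.minFac_prime (by omega)).two_le
    have hpd : p ∣ N := Nat.minFac_dvd N
    have hpm : p ≤ N := Nat.le_of_dvd (by omega) hpd
    have hpdZ : (p : Int) ∣ m := by rw [← hNm]; exact_mod_cast hpd
    have hdp : d ≤ (p : Int) := by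
      by_contra hcon
      exact hinv (p : Int) (by exact_mod_cast hp2) (by omega) hpdZ
    have hNp : N < p * p := by
      have : (N : Int) < (p : Int) * (p : Int) := by rw [hNm]; nlinarith
      exact_mod_cast this
    obtain ⟨q, hq⟩ := hpd
    have hq1 : q = 1 := by
      rcases Nat.lt_or_ge q 2 with h | h
      · have : q ≠ 0 := by rintro rfl; omega
        omega
      · exfalso
        have hqd : q ∣ N := ⟨p, by rw [hq]; ring⟩
        have := Nat.minFac_le_of_dvd h hqd
        nlinarith
    rw [if_pos (by omega)]
    rw [pvOmega_two_le (by omega : 2 ≤ N), ← hp, hq, hq1, Nat.mul_div_cancel_left _ (by omega),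
      pvOmega_one]
    push_cast; ring

-- B's loop: trial division from d counts all prime factors when none below d remain
theorem pvTrialB_spec : ∀ (fuel : Nat) (m d count : Int), 2 ≤ d → 1 ≤ m →
    2 * m - d < fuel → (∀ k : Int, 2 ≤ k → k < d → ¬ k ∣ m) →
    pvTrialB fuel m d count = count + (pvOmega m.toNat : Int) := by
  intro fuel
  induction fuel with
  | zero =>
    intro m d count hd hm hfuel hinv
    push_cast at hfuel
    exact pvTrialB_exit hd hm (by nlinarith) hinv
  | succ fuel ih =>
    intro m d count hd hm hfuel hinv
    rw [pvTrialB]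
    by_cases hdd : d * d ≤ m
    · rw [if_pos hdd]
      by_cases hmod : PySem.Int.mod m d = 0
      · rw [if_pos hmod]
        have hdvd : d ∣ m := (PySem.Int.mod_eq_zero_iff_dvd m d).mp hmod
        obtain ⟨m', hmm'⟩ := hdvd
        have hm'1 : 1 ≤ m' := by nlinarith
        have hfd : PySem.Int.floordiv m d = m' := by
          rw [PySem.Int.floordiv_eq_ediv_of_pos (by omega), hmm',
            Int.mul_ediv_cancel_left _ (by omega : d ≠ 0)]
        have hm4 : 4 ≤ m := by nlinarith
        have hfuel' : 2 * m' - d < (fuel : Int) := by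
          push_cast at hfuel
          have h2m : 2 * m' ≤ m := by nlinarith
          omega
        rw [hfd, ih m' d (count + 1) hd hm'1 hfuel'
          (fun k hk1 hk2 hkd => hinv k hk1 hk2 (hmm' ▸ Dvd.dvd.mul_left hkd d))]
        -- pvOmega m.toNat = pvOmega m'.toNat + 1 because minFac m.toNat = d.toNat
        set N := m.toNat with hN
        have hNm : (N : Int) = m := Int.toNat_of_nonneg (by omega)
        have hdN : d.toNat ∣ N := by
          have : (d.toNat : Int) ∣ (N : Int) := by
            rw [hNm, Int.toNat_of_nonneg (by omega : (0:Int) ≤ d)]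
            exact Dvd.intro m' hmm'.symm
          exact_mod_cast this
        have hN2 : 2 ≤ N := by omega
        have hd2T : 2 ≤ d.toNat := by omega
        have hminle : N.minFac ≤ d.toNat := Nat.minFac_le_of_dvd hd2T hdN
        have hNdvd : (N.minFac : Int) ∣ m := by rw [← hNm]; exact_mod_cast Nat.minFac_dvd N
        have hfd2 : 2 ≤ N.minFac := (Nat.minFac_prime (by omega : N ≠ 1)).two_le
        have hminge : d.toNat ≤ N.minFac := by
          by_contra hcon
          exact hinv (N.minFac : Int) (by exact_mod_cast hfd2) (by omega) hNdvd
        have hmf : N.minFac = d.toNat := by omega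
        have hdT : (d.toNat : Int) = d := Int.toNat_of_nonneg (by omega)
        have hm'T : (m'.toNat : Int) = m' := Int.toNat_of_nonneg (by omega)
        have hNsplit : N = d.toNat * m'.toNat := by
          have : (N : Int) = (d.toNat : Int) * (m'.toNat : Int) := by
            rw [hNm, hdT, hm'T]; exact hmm'
          exact_mod_cast this
        rw [pvOmega_two_le hN2, hmf, hNsplit,
          Nat.mul_div_cancel_left _ (by omega)]
        push_cast; ring
      · rw [if_neg hmod]
        push_cast at hfuel
        refine ih m (d + 1) count (by omega) hm (by omega) ?_
        intro k hk1 hk2 hkd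
        rcases eq_or_lt_of_le (by omega : k ≤ d) with rfl | hlt'
        · exact hmod ((PySem.Int.mod_eq_zero_iff_dvd m k).mpr hkd)
        · exact hinv k hk1 (by omega) hkd
    · rw [if_neg hdd]
      exact pvTrialB_exit hd hm (by omega) hinv

theorem pvLoopA_step (fuel : Nat) (a b count : Int) :
    pvLoopA (fuel + 1) a b count =
      if b > a then
        match pvFindA a b with
        | some i => pvLoopA fuel (a * i) b (count + 1)
        | none => -1
      else if b = a then count else -1 := rfl

-- both loops on the divisible case a ≥ 1, a ∣ b, b > a: first A's side …
theorem pvA_dvd {a b m : Int} (h1 : 1 ≤ a) (hab : a < b) (hb : b ≤ 2147483648)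
    (hm : b = a * m) (hnp : a = 1 → ¬ Nat.Prime b.toNat) :
    pvLoopA 64 a b 0 = (pvOmega m.toNat : Int) := by
  have hm2 : 2 ≤ m := by
    by_contra hc
    push Not at hc
    have := mul_le_mul_of_nonneg_left (by omega : m ≤ 1) (by omega : (0:Int) ≤ a)
    omega
  have h64 : (2:Int) ^ 64 = 18446744073709551616 := by norm_num
  rcases eq_or_lt_of_le h1 with rfl | ha2
  · -- a = 1, so m = b and b.toNat is composite: one manual first step, then pvLoopA_pos
    have hmb : m = b := by omega
    subst hmb
    set N := m.toNat with hN
    have hNm : (N : Int) = m := Int.toNat_of_nonneg (by omega)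
    set p := N.minFac with hp
    have hpp : p.Prime := Nat.minFac_prime (by omega)
    have hp2 : 2 ≤ p := hpp.two_le
    have hpd : p ∣ N := Nat.minFac_dvd N
    have hpm : p ≤ N := Nat.le_of_dvd (by omega) hpd
    have hpN : p < N := by
      rcases eq_or_lt_of_le hpm with heq | h
      · exact absurd (heq ▸ hpp) (hnp rfl)
      · exact h
    obtain ⟨q, hqN⟩ := hpd
    have hq1 : 1 ≤ q := by
      rcases Nat.eq_zero_or_pos q with rfl | h
      · omega
      · exact h
    have hfind : pvFindA 1 m = some (p : Int) := by
      refine pvFindA_min (by exact_mod_cast hp2) (by omega) ?_ ?_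
      · rw [one_mul, ← hNm]; exact_mod_cast Nat.minFac_dvd N
      · intro j hj1 hj2 hjd
        rw [one_mul] at hjd
        have hjN : j.toNat ∣ N := by
          have : (j.toNat : Int) ∣ (N : Int) := by
            rwa [hNm, Int.toNat_of_nonneg (by omega : (0:Int) ≤ j)]
          exact_mod_cast this
        have := Nat.minFac_le_of_dvd (by omega) hjN
        omega
    rw [show (64:Nat) = 63 + 1 from rfl, pvLoopA_step, if_pos (by omega), hfind]
    show pvLoopA 63 (1 * (p : Int)) m 1 = (pvOmega N : Int)
    have hbq : m = (p : Int) * (q : Int) := by rw [← hNm]; exact_mod_cast hqN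
    rw [one_mul, hbq, pvLoopA_pos 63 (p : Int) (q : Int) 1 (by exact_mod_cast hp2)
      (by exact_mod_cast hq1) (by
        have hqN' : q ≤ N := by nlinarith
        have h63 : (2:Int) ^ 63 = 9223372036854775808 := by norm_num
        push_cast
        omega)]
    have hdivN : N / p = q := by rw [hqN]; exact Nat.mul_div_cancel_left _ (by omega)
    rw [pvOmega_two_le (by omega : 2 ≤ N), ← hp, hdivN]
    push_cast [Int.toNat_natCast]
    ring
  · rw [hm, pvLoopA_pos 64 a m 0 (by omega) (by omega) (by nlinarith)]
    ring

-- … then B's side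
theorem pvB_dvd {m : Int} (hm2 : 2 ≤ m) :
    pvTrialB (2 * m).toNat m 2 0 = (pvOmega m.toNat : Int) := by
  rw [pvTrialB_spec (2 * m).toNat m 2 0 le_rfl (by omega) (by omega)
    (fun k hk1 hk2 => absurd hk2 (by omega))]
  ring

-- ===== VERDICT (by name: the statement is the Claim_ definition above) =====
theorem max_multiplications_spec : Claim_unchanged_max_multiplications := by
  intro a b hdom hpre hnD
  simp only [Dom_max_multiplications, pvDomInt, Bool.and_eq_true, decide_eq_true_eq] at hdom
  obtain ⟨⟨ha1, ha2⟩, ⟨hb1, hb2⟩⟩ := hdom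
  unfold max_multiplications max_multiplications_alt
  rcases lt_trichotomy b a with hba | hba | hba
  · rw [if_pos hba, if_pos hba]
  · subst hba
    rw [if_neg (by omega), if_neg (by omega), if_pos rfl,
      show (64:Nat) = 63 + 1 from rfl, pvLoopA_step, if_neg (by omega), if_pos rfl]
  · rw [if_neg (by omega), if_neg (by omega), if_neg (by omega : ¬ b = a)]
    rcases le_or_gt a 0 with ha0 | ha0
    · -- a ≤ 0: B returns -1 directly; A's loop also ends at -1
      rw [if_pos (Or.inl ha0)]
      rcases eq_or_lt_of_le ha0 with rfl | haneg
      · exact absurd ⟨rfl, by omega⟩ hpre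
      rcases le_or_gt b 2 with hb2' | hb3
      · rw [show (64:Nat) = 63 + 1 from rfl, pvLoopA_step, if_pos (by omega),
          show pvFindA a b = none from by
            unfold pvFindA
            rw [show (b - 2).toNat = 0 by omega]
            rfl]
      · refine pvLoopA_neg 64 a b 0 haneg (by omega) ?_
        have h64 : (2:Int) ^ 64 = 18446744073709551616 := by norm_num
        nlinarith
    · -- a ≥ 1
      by_cases hdvd : a ∣ b
      · obtain ⟨m, hm⟩ := hdvd
        have hmod0 : PySem.Int.mod b a = 0 :=
          (PySem.Int.mod_eq_zero_iff_dvd b a).mpr ⟨m, hm⟩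
        rw [if_neg (by
          rintro (h | h)
          · omega
          · exact h hmod0)]
        have hfd : PySem.Int.floordiv b a = m := by
          rw [PySem.Int.floordiv_eq_ediv_of_pos (by omega), hm,
            Int.mul_ediv_cancel_left _ (by omega)]
        have hm2 : 2 ≤ m := by
          by_contra hc
          push Not at hc
          have := mul_le_mul_of_nonneg_left (by omega : m ≤ 1) (by omega : (0:Int) ≤ a)
          omega
        rw [hfd, pvB_dvd hm2, pvA_dvd (by omega) hba hb2 hm
          (fun ha1' hp => hnD ⟨ha1', by omega, hp⟩)]
      · -- a does not divide b: both -1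
        have hmodne : ¬ PySem.Int.mod b a = 0 := fun h =>
          hdvd ((PySem.Int.mod_eq_zero_iff_dvd b a).mp h)
        rw [if_pos (Or.inr hmodne), show (64:Nat) = 63 + 1 from rfl, pvLoopA_step,
          if_pos (by omega),
          show pvFindA a b = none from
            pvFindA_none (fun j hj1 hj2 hjd => hdvd (dvd_trans ⟨j, rfl⟩ hjd))]

theorem max_multiplications_changed : Claim_changed_max_multiplications := by
  unfold Claim_changed_max_multiplications; decide

theorem max_multiplications_tight : Claim_exact_max_multiplications := by
  intro a b _ _ hD
  obtain ⟨rfl, hb1, hprime⟩ := hD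
  have hN2 : 2 ≤ b.toNat := hprime.two_le
  have hA : max_multiplications 1 b = -1 := by
    unfold max_multiplications
    rw [if_neg (by omega), show (64:Nat) = 63 + 1 from rfl, pvLoopA_step,
      if_pos (by omega),
      show pvFindA 1 b = none from
        pvFindA_none (fun j hj1 hj2 hjd => by
          rw [one_mul] at hjd
          have hjN : j.toNat ∣ b.toNat := by
            have : (j.toNat : Int) ∣ ((b.toNat : Nat) : Int) := by
              rwa [Int.toNat_of_nonneg (by omega : (0:Int) ≤ b),
                Int.toNat_of_nonneg (by omega : (0:Int) ≤ j)]
            exact_mod_cast this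
          rcases hprime.eq_one_or_self_of_dvd j.toNat hjN with h | h <;> omega)]
  have hB : max_multiplications_alt 1 b = (pvOmega b.toNat : Int) := by
    unfold max_multiplications_alt
    have hmod0 : PySem.Int.mod b 1 = 0 := (PySem.Int.mod_eq_zero_iff_dvd b 1).mpr ⟨b, (one_mul b).symm⟩
    have hfd : PySem.Int.floordiv b 1 = b := by
      rw [PySem.Int.floordiv_eq_ediv_of_pos (by omega), Int.ediv_one]
    rw [if_neg (by omega), if_neg (by omega), if_neg (by
        rintro (h | h)
        · omega
        · exact h hmod0), hfd, pvB_dvd (by omega)]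
  rw [hA, hB]
  have := Int.natCast_nonneg (pvOmega b.toNat)
  omega
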